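-- pv_equiv track=rewrite | github.com/rishi1001/AI_Poker_2025 | submission/player.py | tuple_to_int_2
-- ===== SOURCE A (Python) =====
-- import math
-- import math
--
-- def tuple_to_int_2(t):
--     """
--     Maps a 2-tuple of integers (0-9) (order doesn't matter, so it's sorted)
--     with repetition allowed to a unique integer in 0..54.
--
--     Steps:
--       1. Sort the tuple in non-decreasing order.
--       2. Transform: y[i] = sorted_tuple[i] + i to get a strictly increasing tuple.
--       3. Rank the combination y among all 2-combinations of numbers from 0 to 10.
--     """
--     # Step 1: sort the tuple
--     t_sorted = sorted(t)
--     # Step 2: transform to strictly increasing tuple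
--     y = [t_sorted[i] + i for i in range(2)]
--
--     # There are n = 10 + 2 - 1 = 11 numbers (0 to 10) to choose from
--     n = 11
--     k = 2
--     rank = 0
--     prev = 0
--     # Step 3: Compute the lexicographic rank
--     for i in range(k):
--         for j in range(prev, y[i]):
--             rank += math.comb(n - j - 1, k - i - 1)
--         prev = y[i] + 1
--     return rank
-- ===== SOURCE B (Python) =====
-- def tuple_to_int_2(t):
--     """Closed-form combinatorial rank of the sorted pair: no loops, no math.comb.
--     rows = complete rows contributed by the smaller element (none below 0)."""
--     a, b = sorted(t)
--     rows = max(a, 0)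
--     return 10 * rows - rows * (rows - 1) // 2 + (b - a)
-- ===== Notes on version B (the rewrite author's own statement) =====
-- stated objective: simpler
-- what changed: Replaces A's nested summation of math.comb terms over two ranges by a closed-form expression on the sorted pair (a,b): rows = max(a,0); 10*rows - rows*(rows-1)//2 + (b-a).
import Mathlib
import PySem

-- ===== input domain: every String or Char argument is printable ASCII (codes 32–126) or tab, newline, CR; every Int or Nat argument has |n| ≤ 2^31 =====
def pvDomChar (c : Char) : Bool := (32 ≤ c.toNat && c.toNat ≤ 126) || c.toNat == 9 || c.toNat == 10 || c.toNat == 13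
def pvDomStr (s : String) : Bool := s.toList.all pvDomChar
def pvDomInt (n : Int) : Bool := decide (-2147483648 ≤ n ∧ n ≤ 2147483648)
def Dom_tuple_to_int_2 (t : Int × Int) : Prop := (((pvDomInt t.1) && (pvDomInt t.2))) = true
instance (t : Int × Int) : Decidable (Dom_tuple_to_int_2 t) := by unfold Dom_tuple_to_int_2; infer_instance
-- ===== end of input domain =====

-- B replaces A's nested comb-summation loops by a closed-form rank of the sorted pair (objective: simpler); return values proved equal on A's whole no-exception set.

-- ===== PORT A =====
def tuple_to_int_2 (t : Int × Int) : Int :=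
  let tSorted := PySem.List.sorted [t.1, t.2] (fun x => x) false
  let y := (PySem.List.pyRange 0 2 1).map (fun i => PySem.List.pyGetD tSorted i 0 + i)
  let n : Int := 11
  let k : Int := 2
  -- rank/prev loop state; math.comb(m, r) with 0 ≤ m (guaranteed on Pre_) is Nat.choose
  let rp := (PySem.List.pyRange 0 k 1).foldl (fun (rp : Int × Int) i =>
      let yi := PySem.List.pyGetD y i 0
      let rank := (PySem.List.pyRange rp.2 yi 1).foldl (fun rank j =>
          rank + ((n - j - 1).toNat.choose (k - i - 1).toNat : Int)) rp.1
      (rank, yi + 1)) (0, 0)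
  rp.1

-- ===== PORT B =====
def tuple_to_int_2_alt (t : Int × Int) : Int :=
  let s := PySem.List.sorted [t.1, t.2] (fun x => x) false
  let a := PySem.List.pyGetD s 0 0
  let b := PySem.List.pyGetD s 1 0
  let rows := max a 0
  10 * rows - PySem.Int.floordiv (rows * (rows - 1)) 2 + (b - a)

-- ===== PRECONDITION & SPEC =====
-- Pre_ is exactly the no-exception set of A: math.comb raises ValueError once a summation index
-- exceeds 10, which happens iff some component exceeds 10 — except when both components equal
-- eleven, where both loops stay empty/in range and A returns normally (and B agrees there).
def Pre_tuple_to_int_2 (t : Int × Int) : Prop :=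
  (t.1 ≤ 10 ∧ t.2 ≤ 10) ∨ (t.1 = 11 ∧ t.2 = 11)
instance (t : Int × Int) : Decidable (Pre_tuple_to_int_2 t) := by unfold Pre_tuple_to_int_2; infer_instance
def pvWitness_tuple_to_int_2 : (Int × Int) := (3, 7)

def Spec_tuple_to_int_2 (t : Int × Int) (out : Int) : Prop := out = tuple_to_int_2_alt t
instance (t : Int × Int) (out : Int) : Decidable (Spec_tuple_to_int_2 t out) := by unfold Spec_tuple_to_int_2; infer_instance

-- ===== CLAIM (what is proved, stated in full; the proofs are below) =====
def Claim_equal_tuple_to_int_2 : Prop := ∀ (t : Int × Int), Dom_tuple_to_int_2 t → Pre_tuple_to_int_2 t → Spec_tuple_to_int_2 t (tuple_to_int_2 t)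

-- ===== LEMMAS AND PROOFS =====

-- sorted of a two-element list, already in order
lemma sorted_pair_le (x y : Int) (h : x ≤ y) :
    PySem.List.sorted [x, y] (fun v => v) false = [x, y] :=
  PySem.List.sorted_id_eq_of_perm_of_pairwise [x, y] [x, y] (List.Perm.refl _) (by simp [h])

-- sorted of a two-element list, out of order
lemma sorted_pair_ge (x y : Int) (h : y ≤ x) :
    PySem.List.sorted [x, y] (fun v => v) false = [y, x] :=
  PySem.List.sorted_id_eq_of_perm_of_pairwise [x, y] [y, x] (List.Perm.swap x y []) (by simp [h])

-- both ports read the input only through the sorted pair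
lemma portA_comm (x y : Int) (h : y ≤ x) : tuple_to_int_2 (x, y) = tuple_to_int_2 (y, x) := by
  simp only [tuple_to_int_2, sorted_pair_le y x h, sorted_pair_ge x y h]

lemma portB_comm (x y : Int) (h : y ≤ x) : tuple_to_int_2_alt (x, y) = tuple_to_int_2_alt (y, x) := by
  simp only [tuple_to_int_2_alt, sorted_pair_le y x h, sorted_pair_ge x y h]

-- the sorted-input case: a ≤ b, b ≤ 10
lemma eq_core (a b : Int) (hab : a ≤ b) (hb : b ≤ 10) :
    tuple_to_int_2 (a, b) = tuple_to_int_2_alt (a, b) := by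
  rcases lt_or_ge a 0 with ha | ha
  · -- negative minimum: A's first inner loop range(0, a) is empty, the second adds 1 per step
    simp only [tuple_to_int_2, tuple_to_int_2_alt, sorted_pair_le a b hab]
    rw [show PySem.List.pyRange 0 2 1 = [0, 1] from by decide]
    have g0 : PySem.List.pyGetD [a, b] (0 : Int) 0 = a := by simp [PySem.List.pyGetD_ofNat']
    have g1 : PySem.List.pyGetD [a, b] (1 : Int) 0 = b := by simp [PySem.List.pyGetD_ofNat']
    simp only [List.map, List.foldl, g0, g1, add_zero]
    have gy0 : PySem.List.pyGetD [a, b + 1] (0 : Int) 0 = a := by simp [PySem.List.pyGetD_ofNat']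
    have gy1 : PySem.List.pyGetD [a, b + 1] (1 : Int) 0 = b + 1 := by simp [PySem.List.pyGetD_ofNat']
    simp only [gy0, gy1]
    rw [PySem.List.pyRange_one_eq_nil (le_of_lt ha), List.foldl_nil]
    rw [PySem.List.foldl_add]
    simp only [show ((2 : Int) - 1 - 1).toNat = 0 from rfl, Nat.choose_zero_right, Nat.cast_one]
    rw [PySem.List.sum_map_const_int, PySem.List.length_pyRange_one]
    rw [max_eq_right (le_of_lt ha)]
    norm_num [show PySem.Int.floordiv 0 2 = 0 from by decide]
    omega
  · -- nonnegative grid 0 ≤ a ≤ b ≤ 10: a finite evaluation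
    have ha10 : a ≤ 10 := le_trans hab hb
    interval_cases a <;> interval_cases b <;> decide

-- ===== VERDICT (by name: the statement is the Claim_ definition above) =====
theorem tuple_to_int_2_spec : Claim_equal_tuple_to_int_2 := by
  unfold Claim_equal_tuple_to_int_2
  rintro ⟨x, y⟩ _ hpre
  unfold Spec_tuple_to_int_2
  rcases hpre with ⟨hx, hy⟩ | ⟨hx, hy⟩
  · rcases le_total x y with h | h
    · exact eq_core x y h hy
    · rw [portA_comm x y h, portB_comm x y h]
      exact eq_core y x h hx
  · subst hx; subst hy; decide
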